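-- pv_equiv track=rewrite | github.com/981377660LMT/algorithm-study | 20_杂题/构造/LCP 70. 沙地治理.py | sandyLandManagement
-- ===== SOURCE A (Python) =====
-- from copy import deepcopy
-- from typing import List
--
-- MAPPING = {
--     0: [],
--     1: [[1, 1]],
--     2: [[1, 1], [2, 1], [2, 3]],
--     3: [[1, 1], [2, 1], [3, 1], [3, 3], [3, 5]],
--     4: [[1, 1], [2, 3], [3, 2], [4, 1], [4, 3], [4, 5], [4, 7]],
-- }
--
-- def sandyLandManagement(size: int) -> List[List[int]]:
--     def dfs(size: int) -> List[List[int]]: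
--         if size <= 4:
--             return deepcopy(MAPPING[size])
--
--         res = dfs(size - 4)
--
--         # 1
--         res.append([size - 3, 1])
--
--         # 2
--         for i in range(1, size - 2):
--             res.append([size - 2, i * 2 + 1])
--
--         # 3
--         res.append([size - 1, 2])
--
--         # 4
--         for i in range(size):
--             res.append([size, i * 2 + 1])
--
--         return res
--
--     return dfs(size)
-- ===== SOURCE B (Python) =====
-- from typing import List
--
-- MAPPING_B = {
--     0: [],
--     1: [[1, 1]],
--     2: [[1, 1], [2, 1], [2, 3]],
--     3: [[1, 1], [2, 1], [3, 1], [3, 3], [3, 5]],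
--     4: [[1, 1], [2, 3], [3, 2], [4, 1], [4, 3], [4, 5], [4, 7]],
-- }
--
-- def sandyLandManagement(size: int) -> List[List[int]]:
--     if size <= 4:
--         return [list(row) for row in MAPPING_B[size]]
--     base = (size - 1) % 4 + 1
--     res = [list(row) for row in MAPPING_B[base]]
--     s = base + 4
--     while s <= size:
--         res.append([s - 3, 1])
--         res.extend([s - 2, 2 * i + 1] for i in range(1, s - 2))
--         res.append([s - 1, 2])
--         res.extend([s, 2 * i + 1] for i in range(s))
--         s += 4
--     return res
-- ===== Notes on version B (the rewrite author's own statement) =====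
-- stated objective: alternative
-- what changed: Replaces the recursive descent (which builds a deep call stack before appending) with a bottom-up while loop that starts from the reduced base case taken from the table and appends the four coordinate block groups for each successive step size.
import Mathlib
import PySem

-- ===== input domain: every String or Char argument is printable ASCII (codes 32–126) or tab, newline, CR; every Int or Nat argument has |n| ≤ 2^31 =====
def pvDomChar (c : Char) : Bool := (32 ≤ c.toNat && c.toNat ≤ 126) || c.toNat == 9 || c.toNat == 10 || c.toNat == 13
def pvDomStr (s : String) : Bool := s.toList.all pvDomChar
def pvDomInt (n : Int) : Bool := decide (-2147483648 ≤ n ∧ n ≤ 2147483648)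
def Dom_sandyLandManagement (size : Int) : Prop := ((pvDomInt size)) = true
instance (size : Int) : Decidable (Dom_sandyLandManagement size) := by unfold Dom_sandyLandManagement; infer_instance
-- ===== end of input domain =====

-- B replaces A's recursive descent by 4 with a bottom-up while loop from the base case; same cost (objective: alternative).

-- ===== PORT A =====
-- MAPPING table (dict lookup for keys 0..4; other keys raise KeyError in Python, excluded by Pre_).
def pvMapping (k : Int) : List (List Int) :=
  if k = 0 then []
  else if k = 1 then [[1, 1]]
  else if k = 2 then [[1, 1], [2, 1], [2, 3]]
  else if k = 3 then [[1, 1], [2, 1], [3, 1], [3, 3], [3, 5]]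
  else if k = 4 then [[1, 1], [2, 3], [3, 2], [4, 1], [4, 3], [4, 5], [4, 7]]
  else []   -- KeyError in Python; unreachable under Pre_

-- dfs: literal transliteration of A's inner recursion (appends become ++ [·]; loops become foldl over pyRange).
def pvDfsA (size : Int) : List (List Int) :=
  if _h : size ≤ 4 then pvMapping size
  else
    let res := pvDfsA (size - 4)
    let res := res ++ [[size - 3, 1]]
    let res := (PySem.List.pyRange 1 (size - 2) 1).foldl (fun r i => r ++ [[size - 2, i * 2 + 1]]) res
    let res := res ++ [[size - 1, 2]]
    (PySem.List.pyRange 0 size 1).foldl (fun r i => r ++ [[size, i * 2 + 1]]) res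
termination_by size.toNat
decreasing_by omega

def sandyLandManagement (size : Int) : List (List Int) := pvDfsA size

-- ===== PORT B =====
-- the four block groups appended for step s (extend of a comprehension = ++ map)
def pvBlock (s : Int) : List (List Int) :=
  [[s - 3, 1]]
    ++ (PySem.List.pyRange 1 (s - 2) 1).map (fun i => [s - 2, 2 * i + 1])
    ++ [[s - 1, 2]]
    ++ (PySem.List.pyRange 0 s 1).map (fun i => [s, 2 * i + 1])

-- the while loop: s goes base+4, base+8, … while s ≤ size
def pvLoopB (size s : Int) (res : List (List Int)) : List (List Int) :=
  if _h : s ≤ size then pvLoopB size (s + 4) (res ++ pvBlock s) else res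
termination_by (size + 1 - s).toNat
decreasing_by omega

def sandyLandManagement_alt (size : Int) : List (List Int) :=
  if size ≤ 4 then pvMapping size
  else
    let base := PySem.Int.mod (size - 1) 4 + 1
    pvLoopB size (base + 4) (pvMapping base)

-- ===== PRECONDITION & SPEC =====
-- Python A raises KeyError (MAPPING[size]) for negative size; Pre_ excludes exactly those.
def Pre_sandyLandManagement (size : Int) : Prop := 0 ≤ size
instance (size : Int) : Decidable (Pre_sandyLandManagement size) := by unfold Pre_sandyLandManagement; infer_instance
def pvWitness_sandyLandManagement : Int := (7)

def Spec_sandyLandManagement (size : Int) (out : List (List Int)) : Prop := out = sandyLandManagement_alt size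
instance (size : Int) (out : List (List Int)) : Decidable (Spec_sandyLandManagement size out) := by unfold Spec_sandyLandManagement; infer_instance

-- ===== CLAIM (what is proved, stated in full; the proofs are below) =====
def Claim_equal_sandyLandManagement : Prop := ∀ (size : Int), Dom_sandyLandManagement size → Pre_sandyLandManagement size → Spec_sandyLandManagement size (sandyLandManagement size)

-- ===== LEMMAS AND PROOFS =====

-- appending one element per loop iteration equals appending the mapped list
theorem pv_foldl_append {α : Type} (f : Int → α) :
    ∀ (l : List Int) (res : List α),
      l.foldl (fun r i => r ++ [f i]) res = res ++ l.map f := by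
  intro l
  induction l with
  | nil => simp
  | cons x xs ih => intro res; simp [List.foldl, ih, List.append_assoc]

-- A's step unfolds to appending pvBlock
theorem pvDfsA_step (size : Int) (h : ¬ size ≤ 4) :
    pvDfsA size = pvDfsA (size - 4) ++ pvBlock size := by
  rw [pvDfsA]
  simp only [h, dite_false, pv_foldl_append, pvBlock, List.append_assoc]
  simp [Int.mul_comm]

theorem pvLoopB_stop (size s : Int) (res : List (List Int)) (h : ¬ s ≤ size) :
    pvLoopB size s res = res := by
  rw [pvLoopB]; simp [h]

theorem pvLoopB_go (size s : Int) (res : List (List Int)) (h : s ≤ size) :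
    pvLoopB size s res = pvLoopB size (s + 4) (res ++ pvBlock s) := by
  rw [pvLoopB]; simp [h]

-- the loop splits off the last step when the stride lands exactly on size
theorem pvLoopB_last : ∀ (n : Nat) (size s : Int) (res : List (List Int)),
    size - s ≤ n → s ≤ size → (4 : Int) ∣ (size - s) →
    pvLoopB size s res = pvLoopB (size - 4) s res ++ pvBlock size := by
  intro n
  induction n with
  | zero =>
    intro size s res hn hs hd
    have he : s = size := by omega
    subst he
    rw [pvLoopB_go s s res (by omega), pvLoopB_stop s (s + 4) _ (by omega),
        pvLoopB_stop (s - 4) s res (by omega)]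
  | succ n ih =>
    intro size s res hn hs hd
    by_cases hlast : s = size
    · subst hlast
      rw [pvLoopB_go s s res (by omega), pvLoopB_stop s (s + 4) _ (by omega),
          pvLoopB_stop (s - 4) s res (by omega)]
    · have hs4 : s + 4 ≤ size := by rcases hd with ⟨c, hc⟩; omega
      rw [pvLoopB_go size s res hs, pvLoopB_go (size - 4) s res (by omega)]
      exact ih size (s + 4) (res ++ pvBlock s) (by omega) hs4
        (by rcases hd with ⟨c, hc⟩; exact ⟨c - 1, by omega⟩)

-- base cases: for size ≤ 4 both return the table entry
theorem pv_base (size : Int) (h : size ≤ 4) :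
    pvDfsA size = sandyLandManagement_alt size := by
  rw [pvDfsA, sandyLandManagement_alt]; simp [h]

-- main equivalence, by strong induction on a Nat bound of size
theorem pv_main : ∀ (n : Nat) (size : Int), size ≤ n → 0 ≤ size →
    pvDfsA size = sandyLandManagement_alt size := by
  intro n
  induction n with
  | zero =>
    intro size h1 h2
    exact pv_base size (by omega)
  | succ n ih =>
    intro size h1 h2
    by_cases h4 : size ≤ 4
    · exact pv_base size h4
    · have hmod : PySem.Int.mod (size - 1) 4 = (size - 1) % 4 :=
        PySem.Int.mod_eq_emod_of_pos (by norm_num)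
      set b : Int := (size - 1) % 4 + 1 with hb
      have hb1 : 1 ≤ b := by
        have := Int.emod_nonneg (size - 1) (by norm_num : (4:Int) ≠ 0); omega
      have hb4 : b ≤ 4 := by
        have := Int.emod_lt_of_pos (size - 1) (by norm_num : (0:Int) < 4); omega
      have hdvd : (4 : Int) ∣ (size - b) := by
        refine ⟨(size - 1) / 4, ?_⟩
        have := Int.mul_ediv_add_emod (size - 1) 4
        omega
      by_cases h8 : size - 4 ≤ 4
      · -- 5 ≤ size ≤ 8: single loop iteration, base = size - 4
        have hbs : b = size - 4 := by omega
        have e1 : sandyLandManagement_alt (size - 4) = pvMapping (size - 4) := by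
          rw [sandyLandManagement_alt]; simp [h8]
        have e2 : sandyLandManagement_alt size = pvLoopB size (b + 4) (pvMapping b) := by
          rw [sandyLandManagement_alt]; simp only [h4, if_false, hmod, ← hb]
        rw [pvDfsA_step size h4, pv_base (size - 4) h8, e1, e2, hbs,
            pvLoopB_go _ _ _ (by omega), pvLoopB_stop _ _ _ (by omega)]
        have h44 : size - 4 + 4 = size := by omega
        rw [h44]
      · -- size ≥ 9: peel the last loop iteration and use the IH at size - 4
        have hih : pvDfsA (size - 4) = sandyLandManagement_alt (size - 4) :=
          ih (size - 4) (by omega) (by omega)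
        have hb' : PySem.Int.mod (size - 4 - 1) 4 + 1 = b := by
          rw [PySem.Int.mod_eq_emod_of_pos (by norm_num)]; omega
        have halt4 : sandyLandManagement_alt (size - 4)
            = pvLoopB (size - 4) (b + 4) (pvMapping b) := by
          rw [sandyLandManagement_alt]
          simp only [h8, if_false, hb']
        have halt : sandyLandManagement_alt size
            = pvLoopB size (b + 4) (pvMapping b) := by
          rw [sandyLandManagement_alt]
          simp only [h4, if_false, hmod, ← hb]
        rw [pvDfsA_step size h4, hih, halt, halt4]
        exact (pvLoopB_last (size - (b + 4)).toNat size (b + 4) (pvMapping b)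
          (by omega) (by omega)
          (by rcases hdvd with ⟨c, hc⟩; exact ⟨c - 1, by omega⟩)).symm

-- ===== VERDICT (by name: the statement is the Claim_ definition above) =====
theorem sandyLandManagement_spec : Claim_equal_sandyLandManagement := by
  intro size _ hpre
  unfold Spec_sandyLandManagement sandyLandManagement
  exact pv_main size.toNat size (by omega) hpre
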